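-- pv_equiv track=rewrite | github.com/faesslerflorian/MT_package | microtubule_tbl_from_imod_object_ex2.py | named_point_list_to_model
-- ===== SOURCE A (Python) =====
-- def named_point_list_to_model(input_list):
--     building_contour = []
--     building_model = []
--     current_contour = input_list[0]
--     current_contour_number = current_contour[0]
--     for ele_index, ele in enumerate(input_list):
--         if ele[0] == current_contour_number:
--             building_contour.append((ele[1], ele[2], ele[3]))
--         else:
--             building_model.append(building_contour)
--             building_contour = [(ele[1], ele[2], ele[3])]
--             if ele_index != len(input_list) - 1:
--                 current_contour = input_list[(ele_index)]
--                 current_contour_number = current_contour[0]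
--     building_model.append(building_contour)
--     return building_model
-- ===== SOURCE B (Python) =====
-- def named_point_list_to_model(input_list):
--     # two-pointer scan: for each run of equal contour numbers, slice it out whole
--     result = []
--     i, n = 0, len(input_list)
--     while i < n:
--         key = input_list[i][0]
--         j = i + 1
--         while j < n and input_list[j][0] == key:
--             j += 1
--         result.append([(e[1], e[2], e[3]) for e in input_list[i:j]])
--         i = j
--     return result
-- ===== Notes on version B (the rewrite author's own statement) =====
-- stated objective: simpler
-- what changed: Replaces A's single stateful accumulator loop (building_contour/building_model/current_contour_number with a special last-index branch) by a two-pointer scan that slices each maximal run of equal contour numbers out in one go.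
import Mathlib
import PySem

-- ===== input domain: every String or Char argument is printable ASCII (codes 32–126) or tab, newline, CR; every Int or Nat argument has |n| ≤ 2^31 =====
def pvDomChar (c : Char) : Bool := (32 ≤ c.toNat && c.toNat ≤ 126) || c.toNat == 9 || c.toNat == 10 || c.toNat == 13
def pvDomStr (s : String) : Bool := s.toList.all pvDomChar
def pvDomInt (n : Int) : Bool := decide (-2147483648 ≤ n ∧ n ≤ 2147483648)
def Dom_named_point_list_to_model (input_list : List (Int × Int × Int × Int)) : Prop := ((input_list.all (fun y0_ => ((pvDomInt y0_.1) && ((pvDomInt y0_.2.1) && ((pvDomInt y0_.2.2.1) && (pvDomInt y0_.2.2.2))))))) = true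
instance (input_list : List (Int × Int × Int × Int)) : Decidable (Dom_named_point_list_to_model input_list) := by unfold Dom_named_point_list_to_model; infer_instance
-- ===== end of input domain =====

-- B replaces A's stateful accumulator loop by a two-pointer run-slicing scan (simpler decomposition, same O(n)).


-- ===== PORT A =====
-- the for-loop over enumerate(input_list): recursion carries the enumerate index i and the
-- state (building_contour, building_model, current_contour, current_contour_number);
-- the trailing 'building_model.append(building_contour)' is done when the list is exhausted.
def pvALoop (full : List (Int × Int × Int × Int)) (i : Nat)
    (rest : List (Int × Int × Int × Int))
    (bc : List (Int × Int × Int)) (bm : List (List (Int × Int × Int)))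
    (cc : Int × Int × Int × Int) (ccn : Int) : List (List (Int × Int × Int)) :=
  match rest with
  | [] => bm ++ [bc]
  | ele :: rest' =>
    if ele.1 == ccn then
      pvALoop full (i + 1) rest' (bc ++ [(ele.2.1, ele.2.2.1, ele.2.2.2)]) bm cc ccn
    else
      if i ≠ full.length - 1 then
        -- input_list[(ele_index)]: index is always in range here, getD never fires
        let cc' := (PySem.List.pyGet? full (Int.ofNat i)).getD ele
        pvALoop full (i + 1) rest' [(ele.2.1, ele.2.2.1, ele.2.2.2)] (bm ++ [bc]) cc' cc'.1
      else
        pvALoop full (i + 1) rest' [(ele.2.1, ele.2.2.1, ele.2.2.2)] (bm ++ [bc]) cc ccn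

def named_point_list_to_model (input_list : List (Int × Int × Int × Int)) : List (List (Int × Int × Int)) :=
  match input_list with
  | [] => []  -- Python raises IndexError at input_list[0]; excluded by Pre_
  | first :: _ => pvALoop input_list 0 input_list [] [] first first.1

-- ===== PORT B =====
-- outer while-loop = recursion on the remaining suffix; inner while-loop advancing j = takeWhile/dropWhile
-- fuel = input length makes the recursion structural (a totality guard only; never exhausted
-- since each step drops at least one element)
def pvBLoop (fuel : Nat) (l : List (Int × Int × Int × Int)) : List (List (Int × Int × Int)) :=
  match fuel, l with
  | _, [] => []
  | 0, _ => []  -- unreachable: fuel starts at the list length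
  | fuel + 1, x :: rest =>
    let run := rest.takeWhile (fun y => y.1 == x.1)
    ((x :: run).map (fun e => (e.2.1, e.2.2.1, e.2.2.2)))
      :: pvBLoop fuel (rest.dropWhile (fun y => y.1 == x.1))

def named_point_list_to_model_alt (input_list : List (Int × Int × Int × Int)) : List (List (Int × Int × Int)) :=
  pvBLoop input_list.length input_list

-- ===== PRECONDITION & SPEC =====
-- Pre_ excludes only the empty list, on which Python A raises IndexError.
def Pre_named_point_list_to_model (input_list : List (Int × Int × Int × Int)) : Prop := input_list ≠ []
instance (input_list : List (Int × Int × Int × Int)) : Decidable (Pre_named_point_list_to_model input_list) := by unfold Pre_named_point_list_to_model; infer_instance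
def pvWitness_named_point_list_to_model : (List (Int × Int × Int × Int)) := [(1, 2, 3, 4), (1, 5, 6, 7), (2, 8, 9, 10)]

def Spec_named_point_list_to_model (input_list : List (Int × Int × Int × Int)) (out : List (List (Int × Int × Int))) : Prop := out = named_point_list_to_model_alt input_list
instance (input_list : List (Int × Int × Int × Int)) (out : List (List (Int × Int × Int))) : Decidable (Spec_named_point_list_to_model input_list out) := by unfold Spec_named_point_list_to_model; infer_instance

-- ===== CLAIM (what is proved, stated in full; the proofs are below) =====
def Claim_equal_named_point_list_to_model : Prop := ∀ (input_list : List (Int × Int × Int × Int)), Dom_named_point_list_to_model input_list → Pre_named_point_list_to_model input_list → Spec_named_point_list_to_model input_list (named_point_list_to_model input_list)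

-- ===== LEMMAS AND PROOFS =====

theorem pvBLoop_fuel_irrel (fuel : Nat) : ∀ (l : List (Int × Int × Int × Int)), l.length ≤ fuel →
    pvBLoop fuel l = pvBLoop l.length l := by
  induction fuel using Nat.strong_induction_on with
  | _ fuel ih =>
    intro l h
    match fuel, l with
    | f, [] => cases f <;> rfl
    | 0, x :: rest => simp at h
    | n + 1, x :: rest =>
      have hd := List.length_dropWhile_le (fun y => y.1 == x.1) rest
      have h1 : rest.length ≤ n := by simp at h; omega
      simp only [pvBLoop, List.length_cons]
      rw [ih n (by omega) _ (le_trans hd h1), ih rest.length (by omega) _ hd]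

theorem alt_nil : named_point_list_to_model_alt [] = [] := rfl

theorem alt_cons (x : Int × Int × Int × Int) (rest : List (Int × Int × Int × Int)) :
    named_point_list_to_model_alt (x :: rest) =
      ((x :: rest.takeWhile (fun y => y.1 == x.1)).map (fun e => (e.2.1, e.2.2.1, e.2.2.2)))
        :: named_point_list_to_model_alt (rest.dropWhile (fun y => y.1 == x.1)) := by
  simp only [named_point_list_to_model_alt, List.length_cons, pvBLoop]
  rw [pvBLoop_fuel_irrel rest.length _ (List.length_dropWhile_le _ _)]

-- the value of A's loop from any state: bm, then the current group bc extended by the run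
-- of ccn-keyed elements, then B's grouping of what remains
theorem pvALoop_eq (full : List (Int × Int × Int × Int)) :
    ∀ (rest : List (Int × Int × Int × Int)) (i : Nat), rest = full.drop i →
    ∀ bc bm cc ccn,
      pvALoop full i rest bc bm cc ccn =
        bm ++ ((bc ++ (rest.takeWhile (fun y => y.1 == ccn)).map (fun e => (e.2.1, e.2.2.1, e.2.2.2)))
          :: named_point_list_to_model_alt (rest.dropWhile (fun y => y.1 == ccn))) := by
  intro rest
  induction rest with
  | nil =>
    intro i _ bc bm cc ccn
    simp [pvALoop, alt_nil]
  | cons ele rest' ih =>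
    intro i hdrop bc bm cc ccn
    have hrest' : rest' = full.drop (i + 1) := by
      have := congrArg (List.drop 1) hdrop
      simpa [List.drop_drop, Nat.add_comm] using this
    have hget : full[i]? = some ele := by
      have : (full.drop i)[0]? = some ele := by rw [← hdrop]; rfl
      simpa using this
    have hilt : i < full.length := by
      by_contra h
      have : full.drop i = [] := List.drop_eq_nil_of_le (by omega)
      rw [this] at hdrop; exact (List.cons_ne_nil _ _) hdrop
    by_cases hkey : ele.1 = ccn
    · simp only [pvALoop, hkey, beq_self_eq_true, if_true]
      rw [ih (i + 1) hrest' (bc ++ [(ele.2.1, ele.2.2.1, ele.2.2.2)]) bm cc ccn]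
      simp [hkey]
    · have hbeq : (ele.1 == ccn) = false := by simp [hkey]
      simp only [pvALoop, hbeq, Bool.false_eq_true, if_false]
      by_cases hlast : i = full.length - 1
      · -- last element: rest' must be []
        have hlen : (full.drop i).length = full.length - i := List.length_drop ..
        rw [← hdrop] at hlen
        have : rest' = [] := by
          cases rest' with
          | nil => rfl
          | cons a b => simp at hlen; omega
        subst this
        rw [if_neg (not_not_intro hlast)]
        rw [ih (i + 1) hrest' _ _ cc ccn]
        simp [hbeq, alt_cons, alt_nil]
      · simp only [ne_eq, hlast, not_false_eq_true, if_true]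
        have hpg : PySem.List.pyGet? full (Int.ofNat i) = some ele := by
          simpa [PySem.List.pyGet?_natCast] using hget
        rw [hpg]
        simp only [Option.getD_some]
        rw [ih (i + 1) hrest' _ _ ele ele.1]
        simp [hbeq, alt_cons]

-- ===== VERDICT (by name: the statement is the Claim_ definition above) =====
theorem named_point_list_to_model_spec : Claim_equal_named_point_list_to_model := by
  intro input_list _ hpre
  unfold Spec_named_point_list_to_model
  match input_list with
  | [] => exact absurd rfl hpre
  | first :: tail =>
    show pvALoop (first :: tail) 0 (first :: tail) [] [] first first.1 = _
    rw [pvALoop_eq (first :: tail) (first :: tail) 0 rfl [] [] first first.1]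
    simp [alt_cons]
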